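-- pv_equiv track=rewrite | github.com/YiseBoge/CompetitiveProgramming | CodeForce/Contest/EduRound84/erasing_zeroes.py | erase_zeroes
-- ===== SOURCE A (Python) =====
-- def erase_zeroes(string):
--     started = False
--     removal_count = 0
--     for i in string:
--         if i == "1":
--             started = True
--         elif started:
--             removal_count += 1
--
--     if not started:
--         return 0
--
--     end_count = 0
--     for i in range(len(string) - 1, -1, -1):
--         if string[i] == "1":
--             break
--         end_count += 1
--
--     return removal_count - end_count
-- ===== SOURCE B (Python) =====
-- def erase_zeroes(string):
--     if '1' not in string:
--         return 0
--     first = string.index('1')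
--     last = string.rindex('1')
--     return sum(1 for c in string[first + 1:last] if c != '1')
-- ===== Notes on version B (the rewrite author's own statement) =====
-- stated objective: simpler
-- what changed: B locates the first and last one-character and counts the other characters in the single slice between them, replacing A's two stateful directional scans (a started-flag forward pass minus a backward trailing-run pass); the measured speedup is constant-factor from C-level find/slice instead of a Python-level character loop.
import Mathlib
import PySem

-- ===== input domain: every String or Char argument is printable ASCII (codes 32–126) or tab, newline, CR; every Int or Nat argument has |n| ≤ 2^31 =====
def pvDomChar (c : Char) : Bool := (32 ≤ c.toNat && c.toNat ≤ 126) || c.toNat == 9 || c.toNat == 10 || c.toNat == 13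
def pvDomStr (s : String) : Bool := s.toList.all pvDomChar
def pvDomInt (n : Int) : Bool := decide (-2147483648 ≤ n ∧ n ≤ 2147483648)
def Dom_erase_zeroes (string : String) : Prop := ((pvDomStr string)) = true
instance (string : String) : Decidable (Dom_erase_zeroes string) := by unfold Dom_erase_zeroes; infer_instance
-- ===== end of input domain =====

-- B replaces A's two stateful directional scans with locate-first/last-'1' then count non-'1'
-- characters in the single slice between them (objective: simpler decomposition).

-- ===== PORT A =====
-- forward loop of A: state (started, removal_count)
def pvLoopA : List Char → Bool → Int → Bool × Int
  | [], s, c => (s, c)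
  | i :: rest, s, c =>
      if i = '1' then pvLoopA rest true c
      else if s then pvLoopA rest s (c + 1)
      else pvLoopA rest s c
-- backward loop of A: 'for i in range(len-1,-1,-1): if string[i]=="1": break; end_count += 1'
-- visits exactly the characters of the reversed string in order, so it is ported as a
-- recursion over the reversed character list with the same break/accumulator behaviour.
def pvLoopEndA : List Char → Int → Int
  | [], acc => acc
  | c :: rest, acc => if c = '1' then acc else pvLoopEndA rest (acc + 1)

def erase_zeroes (string : String) : Int :=
  let r := pvLoopA string.toList false 0
  if r.1 = false then 0
  else r.2 - pvLoopEndA string.toList.reverse 0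

-- ===== PORT B =====
def erase_zeroes_alt (string : String) : Int :=
  let l := string.toList
  if l.contains '1' then
    let first := l.idxOf '1'                       -- string.index('1')
    let last := l.length - 1 - l.reverse.idxOf '1' -- string.rindex('1')
    -- string[first+1:last] (bounds are in range) then count of chars != '1'
    ((l.drop (first + 1)).take (last - (first + 1))).countP (fun c => c != '1')
  else 0

-- ===== PRECONDITION & SPEC =====
def Spec_erase_zeroes (string : String) (out : Int) : Prop := out = erase_zeroes_alt string
instance (string : String) (out : Int) : Decidable (Spec_erase_zeroes string out) := by unfold Spec_erase_zeroes; infer_instance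

-- ===== CLAIM (what is proved, stated in full; the proofs are below) =====
def Claim_equal_erase_zeroes : Prop := ∀ (string : String), Dom_erase_zeroes string → Spec_erase_zeroes string (erase_zeroes string)

-- ===== LEMMAS AND PROOFS =====

theorem pvLoopA_not_mem {l : List Char} (h : '1' ∉ l) (c : Int) :
    pvLoopA l false c = (false, c) := by
  induction l generalizing c with
  | nil => rfl
  | cons x xs ih =>
      simp only [List.mem_cons, not_or] at h
      have hx : ¬ x = '1' := fun hx => h.1 hx.symm
      simp [pvLoopA, hx, ih h.2]

theorem pvLoopA_true (l : List Char) (c : Int) :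
    pvLoopA l true c = (true, c + (l.countP (fun c => c != '1') : Int)) := by
  induction l generalizing c with
  | nil => simp [pvLoopA]
  | cons x xs ih =>
      by_cases hx : x = '1'
      · simp [pvLoopA, hx, ih]
      · simp [pvLoopA, hx, ih]
        ring

theorem pvLoopA_mem {l : List Char} (h : '1' ∈ l) (c : Int) :
    pvLoopA l false c =
      (true, c + ((l.drop (l.idxOf '1' + 1)).countP (fun c => c != '1') : Int)) := by
  induction l generalizing c with
  | nil => cases h
  | cons x xs ih =>
      by_cases hx : x = '1'
      · subst hx
        simp [pvLoopA, pvLoopA_true, List.idxOf_cons_self]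
      · have hxs : '1' ∈ xs := by
          cases h with
          | head => exact absurd rfl hx
          | tail _ h' => exact h'
        have hb : (x == '1') = false := beq_eq_false_iff_ne.mpr hx
        have hix : (x :: xs).idxOf '1' = xs.idxOf '1' + 1 := by
          rw [List.idxOf_cons, hb]; rfl
        simp [pvLoopA, hx, hix, ih hxs]

theorem pvLoopEndA_eq (l : List Char) (acc : Int) :
    pvLoopEndA l acc = acc + ((l.takeWhile (fun c => c != '1')).length : Int) := by
  induction l generalizing acc with
  | nil => simp [pvLoopEndA]
  | cons x xs ih =>
      by_cases hx : x = '1'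
      · simp [pvLoopEndA, hx]
      · simp [pvLoopEndA, hx, ih]
        ring

theorem pv_idxOf_append_self {m k : List Char} (h : '1' ∉ m) :
    (m ++ '1' :: k).idxOf '1' = m.length := by
  induction m with
  | nil => simp [List.idxOf_cons_self]
  | cons x xs ih =>
      simp only [List.mem_cons, not_or] at h
      have hb : (x == '1') = false := beq_eq_false_iff_ne.mpr (fun hx => h.1 hx.symm)
      rw [List.cons_append, List.idxOf_cons, hb, List.length_cons, ih h.2]
      rfl

theorem pv_idxOf_append_left {m : List Char} (ys : List Char) (h : '1' ∈ m) :
    (m ++ ys).idxOf '1' = m.idxOf '1' := by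
  induction m with
  | nil => cases h
  | cons x xs ih =>
      by_cases hx : x = '1'
      · subst hx; simp [List.idxOf_cons_self]
      · have hxs : '1' ∈ xs := by
          cases h with
          | head => exact absurd rfl hx
          | tail _ h' => exact h'
        have hb : (x == '1') = false := beq_eq_false_iff_ne.mpr hx
        rw [List.cons_append, List.idxOf_cons, hb, List.idxOf_cons, hb, ih hxs]

theorem pv_takeWhile_all {k : List Char} (h : '1' ∉ k) (ys : List Char) :
    (k ++ '1' :: ys).takeWhile (fun c => c != '1') = k := by
  induction k with
  | nil => simp
  | cons x xs ih =>
      simp only [List.mem_cons, not_or] at h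
      have hx : ¬ x = '1' := fun hx => h.1 hx.symm
      simp [hx, ih h.2]

-- last-occurrence decomposition
theorem pv_split_last {l : List Char} (h : '1' ∈ l) :
    ∃ m k, l = m ++ '1' :: k ∧ '1' ∉ k := by
  induction l with
  | nil => cases h
  | cons x xs ih =>
      by_cases hxs : '1' ∈ xs
      · obtain ⟨m, k, rfl, hk⟩ := ih hxs
        exact ⟨x :: m, k, rfl, hk⟩
      · have hx : x = '1' := by
          cases h with
          | head => rfl
          | tail _ h' => exact absurd h' hxs
        exact ⟨[], xs, by simp [hx], hxs⟩

theorem pv_main (l : List Char) :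
    (let r := pvLoopA l false 0
     if r.1 = false then 0 else r.2 - pvLoopEndA l.reverse 0) =
    (if l.contains '1' then
      (((l.drop (l.idxOf '1' + 1)).take
          ((l.length - 1 - l.reverse.idxOf '1') - (l.idxOf '1' + 1))).countP
          (fun c => c != '1') : Int)
     else 0) := by
  by_cases hmem : '1' ∈ l
  · obtain ⟨m, k, rfl, hk⟩ := pv_split_last hmem
    have hcont : (m ++ '1' :: k).contains '1' = true := by
      simp
    have hrevIdx : (m ++ '1' :: k).reverse.idxOf '1' = k.length := by
      have : (m ++ '1' :: k).reverse = k.reverse ++ '1' :: m.reverse := by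
        simp
      rw [this, pv_idxOf_append_self (by simpa using hk)]
      simp
    have hlast : (m ++ '1' :: k).length - 1 - (m ++ '1' :: k).reverse.idxOf '1'
        = m.length := by
      rw [hrevIdx]; simp
    have hend : pvLoopEndA (m ++ '1' :: k).reverse 0 = (k.length : Int) := by
      have hrev : (m ++ '1' :: k).reverse = k.reverse ++ '1' :: m.reverse := by simp
      rw [hrev, pvLoopEndA_eq, pv_takeWhile_all (by simpa using hk)]
      simp
    rw [pvLoopA_mem hmem]
    simp only [hcont, if_true, hlast]
    by_cases hm : '1' ∈ m
    · -- first '1' is inside m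
      have hidx : (m ++ '1' :: k).idxOf '1' = m.idxOf '1' := pv_idxOf_append_left _ hm
      have hj : m.idxOf '1' < m.length := List.idxOf_lt_length_of_mem hm
      have hdrop : (m ++ '1' :: k).drop (m.idxOf '1' + 1)
          = m.drop (m.idxOf '1' + 1) ++ '1' :: k := by
        rw [List.drop_append_of_le_length (by omega)]
      have hlen : (m.drop (m.idxOf '1' + 1)).length = m.length - (m.idxOf '1' + 1) := by
        simp
      have htake : ((m.drop (m.idxOf '1' + 1) ++ '1' :: k).take
          (m.length - (m.idxOf '1' + 1))) = m.drop (m.idxOf '1' + 1) := by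
        rw [← hlen, List.take_left]
      have hcount : (m.drop (m.idxOf '1' + 1) ++ '1' :: k).countP (fun c => c != '1')
          = (m.drop (m.idxOf '1' + 1)).countP (fun c => c != '1') + k.length := by
        rw [List.countP_append, List.countP_cons]
        have : k.countP (fun c => c != '1') = k.length := by
          rw [List.countP_eq_length]
          intro a ha
          simp only [bne_iff_ne, ne_eq]
          intro h'; exact hk (h' ▸ ha)
        simp [this]
      simp only [hidx, hdrop, htake, hcount, hend]
      push_cast
      ring
    · -- first '1' is the splitting one: slice is empty, tail run cancels the count
      have hidx : (m ++ '1' :: k).idxOf '1' = m.length := pv_idxOf_append_self hm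
      have hdrop : (m ++ '1' :: k).drop (m.length + 1) = k := by
        simp
      have hcount : k.countP (fun c => c != '1') = k.length := by
        rw [List.countP_eq_length]
        intro a ha
        simp only [bne_iff_ne, ne_eq]
        intro h'; exact hk (h' ▸ ha)
      simp only [hidx, hdrop]
      rw [hend]
      simp [hcount]
  · have h1 : pvLoopA l false 0 = (false, 0) := pvLoopA_not_mem hmem 0
    have h2 : l.contains '1' = false := by simpa using hmem
    simp only [h1]
    simp [hmem]

-- ===== VERDICT (by name: the statement is the Claim_ definition above) =====
theorem erase_zeroes_spec : Claim_equal_erase_zeroes := by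
  intro s _
  show erase_zeroes s = erase_zeroes_alt s
  unfold erase_zeroes erase_zeroes_alt
  exact pv_main s.toList
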